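-- pv_equiv track=rewrite | github.com/7lucaslombardi/TRABAJO_FINAL_PROG_1 | funciones/truco.py | verificar_mano
-- ===== SOURCE A (Python) =====
-- def verificar_mano(lista_carta_jugador : list,lista_carta_maquina : list) -> tuple:
--     mano_ganadas_jugador = 0
--     mano_ganadas_maquina = 0
--     manos_ganadas = []  # Lista para almacenar quién ganó cada mano
--
--     for i in range(len(lista_carta_jugador)):
--         carta_jugador = lista_carta_jugador[i] # Compara carta con carta 1 y 1 y asi repetidamente, las manos
--         carta_maquina = lista_carta_maquina[i]
--
--         if carta_jugador["valor_truco"] > carta_maquina["valor_truco"]: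
--             mano_ganadas_jugador += 1
--             manos_ganadas.append("jugador")  # Gana jugador
--         elif carta_maquina["valor_truco"] >  carta_jugador["valor_truco"]:
--             mano_ganadas_maquina += 1
--             manos_ganadas.append("maquina")  # Gana maquina
--         else:
--             manos_ganadas.append("empate")
--
--     # DESEMPATE
--     # Se verifica si las 3 rondas fueron jugadas
--     if len(manos_ganadas) == 3:
--         # Si las rondas ganadas son iguales, verificamos el empate en las manos
--         if mano_ganadas_jugador == mano_ganadas_maquina:
--             # Verificar si la primera mano fue empate
--             if manos_ganadas[0] == "empate":
--                 # Si la primera fue empate, ver la segunda mano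
--                 if manos_ganadas[1] == "jugador":
--                     mano_ganadas_jugador += 1
--                 elif manos_ganadas[1] == "maquina":
--                     mano_ganadas_maquina += 1
--                 else:
--                     # Si también hay empate en la segunda, decidir con la tercera mano
--                     if manos_ganadas[2] == "jugador":
--                         mano_ganadas_jugador += 1
--                     elif manos_ganadas[2] == "maquina":
--                         mano_ganadas_maquina += 1
--             else:
--                 # Si la primera mano no fue empate, le asignamos la ronda al que ganó la primera mano
--                 if manos_ganadas[0] == "jugador":
--                     mano_ganadas_jugador += 1  # El jugador gana la ronda por la primera mano
--                 else:
--                     mano_ganadas_maquina += 1  # La maquina gana la ronda por la primera mano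
--
--     # Al final, devolvemos el marcador
--     return mano_ganadas_jugador, mano_ganadas_maquina
-- ===== SOURCE B (Python) =====
-- def verificar_mano(lista_carta_jugador: list, lista_carta_maquina: list) -> tuple:
--     n = len(lista_carta_jugador)
--     mano_ganadas_jugador = 0
--     mano_ganadas_maquina = 0
--     lead = 0  # sign of the earliest decisive round; overwritten while walking backwards
--     for i in range(n - 1, -1, -1):
--         d = lista_carta_jugador[i]["valor_truco"] - lista_carta_maquina[i]["valor_truco"]
--         if d > 0:
--             mano_ganadas_jugador += 1
--             lead = 1
--         elif d < 0:
--             mano_ganadas_maquina += 1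
--             lead = -1
--     if n == 3 and mano_ganadas_jugador == mano_ganadas_maquina:
--         if lead > 0:
--             mano_ganadas_jugador += 1
--         elif lead < 0:
--             mano_ganadas_maquina += 1
--     return mano_ganadas_jugador, mano_ganadas_maquina
-- ===== Notes on version B (the rewrite author's own statement) =====
-- stated objective: simpler
-- what changed: A single reverse-order pass keeping an arithmetic sign and a 'lead' register (earliest decisive round seen while walking backwards) replaces A's winners list, the forward counting loop and the nested position-0/1/2 tie-break ladder.
import Mathlib
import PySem

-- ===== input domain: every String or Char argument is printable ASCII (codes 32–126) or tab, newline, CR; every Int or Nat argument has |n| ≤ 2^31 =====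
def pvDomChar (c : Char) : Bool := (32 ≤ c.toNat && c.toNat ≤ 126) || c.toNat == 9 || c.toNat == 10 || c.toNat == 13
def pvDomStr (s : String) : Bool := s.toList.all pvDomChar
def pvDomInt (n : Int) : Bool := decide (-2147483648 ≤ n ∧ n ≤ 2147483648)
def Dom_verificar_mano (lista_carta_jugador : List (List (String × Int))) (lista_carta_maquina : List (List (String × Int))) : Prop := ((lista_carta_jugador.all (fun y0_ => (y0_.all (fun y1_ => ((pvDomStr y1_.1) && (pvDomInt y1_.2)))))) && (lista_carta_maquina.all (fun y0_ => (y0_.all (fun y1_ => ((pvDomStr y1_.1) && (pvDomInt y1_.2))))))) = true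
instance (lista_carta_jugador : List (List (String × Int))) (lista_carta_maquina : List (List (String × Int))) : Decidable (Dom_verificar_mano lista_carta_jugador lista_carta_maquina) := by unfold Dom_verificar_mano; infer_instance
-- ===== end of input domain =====

-- B: one reverse-order pass with an arithmetic sign and a 'lead' register replaces A's winners
-- list, counts and nested tie-break ladder (simpler; same cost).

-- ===== PORT A =====
-- literal port of A: index loop over range(len(lista_carta_jugador)) carrying
-- (mano_ganadas_jugador, mano_ganadas_maquina, manos_ganadas), then the nested tie-break ladder.
-- card["valor_truco"] = first-match lookup; .getD 0 is exact under Pre_ (key present).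
def verificar_mano (lista_carta_jugador : List (List (String × Int))) (lista_carta_maquina : List (List (String × Int))) : Int × Int :=
  let st := (PySem.List.pyRange 0 lista_carta_jugador.length 1).foldl
    (fun (st : Int × Int × List String) i =>
      let carta_jugador := PySem.List.pyGetD lista_carta_jugador i []
      let carta_maquina := PySem.List.pyGetD lista_carta_maquina i []
      let vj := (carta_jugador.lookup "valor_truco").getD 0
      let vm := (carta_maquina.lookup "valor_truco").getD 0
      if vj > vm then (st.1 + 1, st.2.1, st.2.2 ++ ["jugador"])
      else if vm > vj then (st.1, st.2.1 + 1, st.2.2 ++ ["maquina"])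
      else (st.1, st.2.1, st.2.2 ++ ["empate"]))
    ((0 : Int), (0 : Int), ([] : List String))
  let mano_ganadas_jugador := st.1
  let mano_ganadas_maquina := st.2.1
  let manos_ganadas := st.2.2
  if manos_ganadas.length = 3 then
    if mano_ganadas_jugador = mano_ganadas_maquina then
      if PySem.List.pyGetD manos_ganadas 0 "" = "empate" then
        if PySem.List.pyGetD manos_ganadas 1 "" = "jugador" then (mano_ganadas_jugador + 1, mano_ganadas_maquina)
        else if PySem.List.pyGetD manos_ganadas 1 "" = "maquina" then (mano_ganadas_jugador, mano_ganadas_maquina + 1)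
        else
          if PySem.List.pyGetD manos_ganadas 2 "" = "jugador" then (mano_ganadas_jugador + 1, mano_ganadas_maquina)
          else if PySem.List.pyGetD manos_ganadas 2 "" = "maquina" then (mano_ganadas_jugador, mano_ganadas_maquina + 1)
          else (mano_ganadas_jugador, mano_ganadas_maquina)
      else
        if PySem.List.pyGetD manos_ganadas 0 "" = "jugador" then (mano_ganadas_jugador + 1, mano_ganadas_maquina)
        else (mano_ganadas_jugador, mano_ganadas_maquina + 1)
    else (mano_ganadas_jugador, mano_ganadas_maquina)
  else (mano_ganadas_jugador, mano_ganadas_maquina)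

-- ===== PORT B =====
-- literal port of Source B: fold over range(n-1, -1, -1) carrying (j, m, lead), then the lead-based tie-break.
def verificar_mano_alt (lista_carta_jugador : List (List (String × Int))) (lista_carta_maquina : List (List (String × Int))) : Int × Int :=
  let n : Int := lista_carta_jugador.length
  let st := (PySem.List.pyRange (n - 1) (-1) (-1)).foldl
    (fun (st : Int × Int × Int) i =>
      let d := ((PySem.List.pyGetD lista_carta_jugador i []).lookup "valor_truco").getD 0 -
               ((PySem.List.pyGetD lista_carta_maquina i []).lookup "valor_truco").getD 0
      if d > 0 then (st.1 + 1, st.2.1, 1)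
      else if d < 0 then (st.1, st.2.1 + 1, -1)
      else st)
    ((0 : Int), (0 : Int), (0 : Int))
  if n = 3 ∧ st.1 = st.2.1 then
    if st.2.2 > 0 then (st.1 + 1, st.2.1)
    else if st.2.2 < 0 then (st.1, st.2.1 + 1)
    else (st.1, st.2.1)
  else (st.1, st.2.1)

-- ===== PRECONDITION & SPEC =====
-- Pre_ excludes exactly the inputs where A raises: IndexError when lista_carta_maquina is
-- shorter than lista_carta_jugador, KeyError when a card the loop reads lacks "valor_truco".
def Pre_verificar_mano (lista_carta_jugador : List (List (String × Int))) (lista_carta_maquina : List (List (String × Int))) : Prop :=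
  lista_carta_jugador.length ≤ lista_carta_maquina.length ∧
  (∀ c ∈ lista_carta_jugador, (c.lookup "valor_truco").isSome) ∧
  (∀ c ∈ lista_carta_maquina.take lista_carta_jugador.length, (c.lookup "valor_truco").isSome)
instance (lista_carta_jugador : List (List (String × Int))) (lista_carta_maquina : List (List (String × Int))) : Decidable (Pre_verificar_mano lista_carta_jugador lista_carta_maquina) := by unfold Pre_verificar_mano; infer_instance

def pvWitness_verificar_mano : (List (List (String × Int))) × (List (List (String × Int))) :=
  ([[("valor_truco", 3)], [("valor_truco", 1)], [("valor_truco", 2)]],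
   [[("valor_truco", 3)], [("valor_truco", 2)], [("valor_truco", 1)]])

def Spec_verificar_mano (lista_carta_jugador : List (List (String × Int))) (lista_carta_maquina : List (List (String × Int))) (out : Int × Int) : Prop := out = verificar_mano_alt lista_carta_jugador lista_carta_maquina
instance (lista_carta_jugador : List (List (String × Int))) (lista_carta_maquina : List (List (String × Int))) (out : Int × Int) : Decidable (Spec_verificar_mano lista_carta_jugador lista_carta_maquina out) := by unfold Spec_verificar_mano; infer_instance

-- ===== CLAIM =====
def Claim_equal_verificar_mano : Prop := ∀ (lista_carta_jugador : List (List (String × Int))) (lista_carta_maquina : List (List (String × Int))), Dom_verificar_mano lista_carta_jugador lista_carta_maquina → Pre_verificar_mano lista_carta_jugador lista_carta_maquina → Spec_verificar_mano lista_carta_jugador lista_carta_maquina (verificar_mano lista_carta_jugador lista_carta_maquina)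

-- ===== LEMMAS AND PROOFS =====

-- the per-hand step of A's loop body on a zipped pair of cards
def pvStep (s : Int × Int × List String) (p : List (String × Int) × List (String × Int)) : Int × Int × List String :=
  let vj := (p.1.lookup "valor_truco").getD 0
  let vm := (p.2.lookup "valor_truco").getD 0
  if vj > vm then (s.1 + 1, s.2.1, s.2.2 ++ ["jugador"])
  else if vm > vj then (s.1, s.2.1 + 1, s.2.2 ++ ["maquina"])
  else (s.1, s.2.1, s.2.2 ++ ["empate"])

-- the per-hand winner
def pvWinner (p : List (String × Int) × List (String × Int)) : String :=
  if (p.1.lookup "valor_truco").getD 0 > (p.2.lookup "valor_truco").getD 0 then "jugador"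
  else if (p.2.lookup "valor_truco").getD 0 > (p.1.lookup "valor_truco").getD 0 then "maquina"
  else "empate"

-- B's loop step, expressed on the per-hand winner
def pvBStep (s : Int × Int × Int) (w : String) : Int × Int × Int :=
  if w = "jugador" then (s.1 + 1, s.2.1, 1)
  else if w = "maquina" then (s.1, s.2.1 + 1, -1)
  else s

-- sign of the earliest decisive hand
def pvLead : List String → Int
  | [] => 0
  | a :: t => if a = "jugador" then 1 else if a = "maquina" then -1 else pvLead t

theorem pvStep_characterization (ps : List (List (String × Int) × List (String × Int)))
    (j m : Int) (w : List String) :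
    ps.foldl pvStep (j, m, w) =
      (j + ((ps.map pvWinner).count "jugador" : Int),
       m + ((ps.map pvWinner).count "maquina" : Int),
       w ++ ps.map pvWinner) := by
  induction ps generalizing j m w with
  | nil => simp
  | cons p ps ih =>
    simp only [List.foldl_cons, List.map_cons, pvStep, pvWinner]
    split_ifs with h1 h2 <;> rw [ih] <;> simp <;> omega

-- B's reverse fold computes the counts and the earliest decisive sign
theorem pvBStep_characterization (w : List String) :
    w.reverse.foldl pvBStep ((0 : Int), (0 : Int), (0 : Int)) =
      ((w.count "jugador" : Int), (w.count "maquina" : Int), pvLead w) := by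
  induction w with
  | nil => simp [pvLead]
  | cons a t ih =>
    simp only [List.reverse_cons, List.foldl_append, List.foldl_cons, List.foldl_nil, ih]
    by_cases h1 : a = "jugador"
    · subst h1; simp [pvBStep, pvLead]
    · by_cases h2 : a = "maquina"
      · subst h2; simp [pvBStep, pvLead]
      · simp [pvBStep, pvLead, h1, h2]

-- a foldr over range(0, len z) reading z[i] is a foldr over z
theorem pvFoldr_range (z : List String) (g : (Int × Int × Int) → String → (Int × Int × Int))
    (init : Int × Int × Int) :
    (PySem.List.pyRange 0 (z.length : Int) 1).foldr
        (fun i acc => g acc (PySem.List.pyGetD z i "")) init =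
      z.foldr (fun x acc => g acc x) init := by
  induction z using List.reverseRecOn generalizing init with
  | nil => simp
  | append_singleton t x ih =>
    have hlen : ((t ++ [x]).length : Int) = (t.length : Int) + 1 := by simp
    rw [hlen, PySem.List.pyRange_one_succ_right (by positivity), List.foldr_append,
        List.foldr_append]
    simp only [List.foldr_cons, List.foldr_nil]
    have hx : PySem.List.pyGetD (t ++ [x]) (t.length : Int) "" = x := by
      rw [PySem.List.pyGetD_eq_getElem _ _ (by positivity) ?_]
      · simp
      · simp
    rw [hx]
    rw [← ih (g init x)]
    apply List.foldr_ext
    intro i hi acc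
    rw [PySem.List.mem_pyRange_one] at hi
    congr 1
    rw [PySem.List.pyGetD_eq_getElem (t ++ [x]) "" hi.1 (by simp; omega),
        PySem.List.pyGetD_eq_getElem t "" hi.1 hi.2]
    simp only [List.getElem_append_left (by omega : i.toNat < t.length)]

-- A's tie-break ladder equals B's lead rule on any winner list over {jugador, maquina, empate}
theorem pvTie (w : List String) (hw : ∀ x ∈ w, x = "jugador" ∨ x = "maquina" ∨ x = "empate") :
    (if w.length = 3 then
      if ((w.count "jugador" : Int)) = ((w.count "maquina" : Int)) then
        if PySem.List.pyGetD w 0 "" = "empate" then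
          if PySem.List.pyGetD w 1 "" = "jugador" then ((w.count "jugador" : Int) + 1, (w.count "maquina" : Int))
          else if PySem.List.pyGetD w 1 "" = "maquina" then ((w.count "jugador" : Int), (w.count "maquina" : Int) + 1)
          else
            if PySem.List.pyGetD w 2 "" = "jugador" then ((w.count "jugador" : Int) + 1, (w.count "maquina" : Int))
            else if PySem.List.pyGetD w 2 "" = "maquina" then ((w.count "jugador" : Int), (w.count "maquina" : Int) + 1)
            else ((w.count "jugador" : Int), (w.count "maquina" : Int))
        else
          if PySem.List.pyGetD w 0 "" = "jugador" then ((w.count "jugador" : Int) + 1, (w.count "maquina" : Int))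
          else ((w.count "jugador" : Int), (w.count "maquina" : Int) + 1)
      else ((w.count "jugador" : Int), (w.count "maquina" : Int))
    else ((w.count "jugador" : Int), (w.count "maquina" : Int)))
    =
    (if (w.length : Int) = 3 ∧ ((w.count "jugador" : Int)) = ((w.count "maquina" : Int)) then
      if pvLead w > 0 then ((w.count "jugador" : Int) + 1, (w.count "maquina" : Int))
      else if pvLead w < 0 then ((w.count "jugador" : Int), (w.count "maquina" : Int) + 1)
      else ((w.count "jugador" : Int), (w.count "maquina" : Int))
    else ((w.count "jugador" : Int), (w.count "maquina" : Int))) := by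
  by_cases h3 : w.length = 3
  · obtain ⟨a, b, c, rfl⟩ := List.length_eq_three.mp h3
    rcases hw a (by simp) with rfl | rfl | rfl <;>
      rcases hw b (by simp) with rfl | rfl | rfl <;>
        rcases hw c (by simp) with rfl | rfl | rfl <;> decide
  · have h3' : ¬ ((w.length : Int) = 3) := by exact_mod_cast h3
    simp [h3, h3']

theorem verificar_mano_spec : Claim_equal_verificar_mano := by
  intro lj lm _ hpre
  obtain ⟨hlen, hkj, hkm⟩ := hpre
  unfold Spec_verificar_mano verificar_mano verificar_mano_alt
  simp only []
  have hzlen : (lj.zip lm).length = lj.length := by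
    simp [List.length_zip]; omega
  set w := (lj.zip lm).map pvWinner with hw
  -- A's index loop is the fold of pvStep over the zipped hands
  have hfold : (PySem.List.pyRange 0 (lj.length : Int) 1).foldl
      (fun (st : Int × Int × List String) i =>
        let carta_jugador := PySem.List.pyGetD lj i []
        let carta_maquina := PySem.List.pyGetD lm i []
        let vj := (carta_jugador.lookup "valor_truco").getD 0
        let vm := (carta_maquina.lookup "valor_truco").getD 0
        if vj > vm then (st.1 + 1, st.2.1, st.2.2 ++ ["jugador"])
        else if vm > vj then (st.1, st.2.1 + 1, st.2.2 ++ ["maquina"])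
        else (st.1, st.2.1, st.2.2 ++ ["empate"]))
      ((0 : Int), (0 : Int), ([] : List String))
      = (lj.zip lm).foldl pvStep ((0 : Int), (0 : Int), ([] : List String)) := by
    rw [show (lj.length : Int) = ((lj.zip lm).length : Int) by rw [hzlen]]
    rw [PySem.List.foldl_congr_mem (g := fun acc i => pvStep acc (PySem.List.pyGetD (lj.zip lm) i ([], [])))]
    · exact PySem.List.foldl_pyRange_zero_pyGetD' (lj.zip lm) ([], []) pvStep _
    · intro acc i hi
      rw [PySem.List.mem_pyRange_one] at hi
      have hi2 : i < ((lj.zip lm).length : Int) := hi.2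
      have hilj : i < (lj.length : Int) := by rw [← hzlen]; exact_mod_cast hi2
      have hilm : i < (lm.length : Int) := by omega
      rw [PySem.List.pyGetD_eq_getElem lj [] hi.1 hilj,
          PySem.List.pyGetD_eq_getElem lm [] hi.1 hilm,
          PySem.List.pyGetD_eq_getElem (lj.zip lm) ([], []) hi.1 hi2,
          List.getElem_zip]
      rfl
  -- B's countdown loop is the reverse fold of pvBStep over the per-hand winners
  have hbfold : (PySem.List.pyRange ((lj.length : Int) - 1) (-1) (-1)).foldl
      (fun (st : Int × Int × Int) i =>
        let d := ((PySem.List.pyGetD lj i []).lookup "valor_truco").getD 0 -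
                 ((PySem.List.pyGetD lm i []).lookup "valor_truco").getD 0
        if d > 0 then (st.1 + 1, st.2.1, 1)
        else if d < 0 then (st.1, st.2.1 + 1, -1)
        else st)
      ((0 : Int), (0 : Int), (0 : Int))
      = w.reverse.foldl pvBStep ((0 : Int), (0 : Int), (0 : Int)) := by
    have hr : PySem.List.pyRange ((lj.length : Int) - 1) (-1) (-1)
        = (PySem.List.pyRange 0 (lj.length : Int) 1).reverse := by
      rw [PySem.List.pyRange_neg_one_eq_reverse]
      norm_num
    rw [hr]
    rw [PySem.List.foldl_congr_mem (g := fun acc i => pvBStep acc (PySem.List.pyGetD w i ""))]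
    · rw [List.foldl_reverse]
      have hwlen : (lj.length : Int) = (w.length : Int) := by simp [hw, hzlen]
      rw [hwlen, pvFoldr_range w pvBStep ((0 : Int), (0 : Int), (0 : Int)), ← List.foldl_reverse]
    · intro acc i hi
      rw [List.mem_reverse, PySem.List.mem_pyRange_one] at hi
      have hilj : i < (lj.length : Int) := hi.2
      have hilm : i < (lm.length : Int) := by omega
      have hiw : i < (w.length : Int) := by simp [hw, hzlen]; omega
      rw [PySem.List.pyGetD_eq_getElem lj [] hi.1 hilj,
          PySem.List.pyGetD_eq_getElem lm [] hi.1 hilm,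
          PySem.List.pyGetD_eq_getElem w "" hi.1 hiw]
      simp only [hw, List.getElem_map, List.getElem_zip]
      unfold pvWinner pvBStep
      split_ifs <;> simp_all
  rw [hfold, pvStep_characterization, hbfold, pvBStep_characterization]
  simp only [List.nil_append, zero_add, ← hw]
  have hw3 : ∀ x ∈ w, x = "jugador" ∨ x = "maquina" ∨ x = "empate" := by
    intro x hx
    simp only [hw, List.mem_map] at hx
    obtain ⟨p, _, rfl⟩ := hx
    unfold pvWinner
    split_ifs <;> simp
  have := pvTie w hw3
  have hwlen : (lj.length : Int) = (w.length : Int) := by simp [hw, hzlen]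
  rw [hwlen]
  convert this using 2
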